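-- pv_equiv track=rewrite | github.com/nestauk/innovation_sweet_spots | innovation_sweet_spots/analysis/discourse_utils.py | aggregate_patterns
-- ===== SOURCE A (Python) =====
-- from collections import Counter, defaultdict
--
-- def aggregate_patterns(phrase_dict, sort_phrases = True):
--     """
--     Combine found matches and count frequency.
--
--     Parameters
--     ----------
--     phrase_dict (dictionary): dictionary with period name as key and list of phrases as values.
--     sort_phrases (Boolean): option to sort phrases alphabetically, the default is True.
--
--     Returns
--     -------
--     agg_results (dict): dictionary with period name as key and list of (phrase, count)
--     as values.
--
--     """
--     agg_results = defaultdict(list)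
--     for year_period, phrases in phrase_dict.items():
--        flat_results = [elem for sublist in phrases for elem in sublist]
--        sorted_results = sorted(Counter(flat_results).items())
--        agg_results[year_period] = sorted_results
--     return agg_results
--     return agg_results
-- ===== SOURCE B (Python) =====
-- from collections import defaultdict
--
--
-- def aggregate_patterns(phrase_dict, sort_phrases=True):
--     """Same result via sort-then-run-scan: sort the flattened phrases and count
--     runs of equal elements with two pointers, instead of Counter + sorted items."""
--     agg_results = defaultdict(list)
--     for year_period, phrases in phrase_dict.items():
--         flat = sorted(elem for sublist in phrases for elem in sublist)
--         counts = []
--         i, n = 0, len(flat)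
--         while i < n:
--             j = i + 1
--             while j < n and flat[j] == flat[i]:
--                 j += 1
--             counts.append((flat[i], j - i))
--             i = j
--         agg_results[year_period] = counts
--     return agg_results
-- ===== Notes on version B (the rewrite author's own statement) =====
-- stated objective: alternative
-- what changed: Replaces Counter-then-sort-items per period with sorting the flattened phrase list and counting runs of equal neighbours with a two-pointer scan, emitting (phrase, count) pairs already in order.
import Mathlib
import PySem

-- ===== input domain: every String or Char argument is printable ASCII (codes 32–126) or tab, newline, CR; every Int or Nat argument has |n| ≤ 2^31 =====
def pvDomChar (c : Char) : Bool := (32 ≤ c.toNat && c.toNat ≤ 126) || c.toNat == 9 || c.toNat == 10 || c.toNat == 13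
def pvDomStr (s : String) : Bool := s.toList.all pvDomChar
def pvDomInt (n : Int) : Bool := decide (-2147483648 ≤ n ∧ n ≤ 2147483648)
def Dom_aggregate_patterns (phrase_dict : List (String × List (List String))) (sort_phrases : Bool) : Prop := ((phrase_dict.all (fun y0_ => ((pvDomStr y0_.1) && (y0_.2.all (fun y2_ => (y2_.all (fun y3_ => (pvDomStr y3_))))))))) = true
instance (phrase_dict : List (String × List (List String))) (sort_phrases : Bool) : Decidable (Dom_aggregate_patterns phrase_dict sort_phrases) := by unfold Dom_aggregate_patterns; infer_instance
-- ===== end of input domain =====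

-- B replaces Counter-then-sorted-items per period by sort-then-run-scan (two pointers over the sorted
-- flat list); same return value, a genuinely different per-period algorithm of similar cost.


-- ===== PORT A =====
-- sorted(Counter(flat).items()): Python compares the (str, int) tuples lexicographically; the keys of
-- Counter(...).items() are distinct, so sorting by the string key alone is exact.
def aggregate_patterns (phrase_dict : List (String × List (List String))) (sort_phrases : Bool) : List (String × List (String × Int)) :=
  (phrase_dict.foldl
    (fun agg kv =>
      -- flat_results = [elem for sublist in phrases for elem in sublist]
      let flat_results := kv.2.flatten
      -- sorted_results = sorted(Counter(flat_results).items())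
      let sorted_results := PySem.List.sorted (PySem.Dict.counter flat_results).items (fun p => p.1)
      agg.insert kv.1 sorted_results)
    PySem.Dict.empty).items

-- ===== PORT B =====
-- the two-pointer run scan over the sorted flat list: each step emits the head with the length of its
-- run (j - i in Source B = 1 + length of the equal prefix of the tail) and continues after the run
def pvRuns : List String → List (String × Int)
  | [] => []
  | x :: xs =>
    (x, ((xs.takeWhile (· == x)).length + 1 : Int)) :: pvRuns (xs.dropWhile (· == x))
termination_by l => l.length
decreasing_by
  have := (List.dropWhile_sublist (l := xs) (· == x)).length_le
  simpa using Nat.lt_succ_of_le this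

def aggregate_patterns_alt (phrase_dict : List (String × List (List String))) (sort_phrases : Bool) : List (String × List (String × Int)) :=
  (phrase_dict.foldl
    (fun agg kv =>
      let flat := PySem.List.sorted kv.2.flatten (fun s => s)
      agg.insert kv.1 (pvRuns flat))
    PySem.Dict.empty).items

-- ===== PRECONDITION & SPEC =====
def Spec_aggregate_patterns (phrase_dict : List (String × List (List String))) (sort_phrases : Bool) (out : List (String × List (String × Int))) : Prop := out = aggregate_patterns_alt phrase_dict sort_phrases
instance (phrase_dict : List (String × List (List String))) (sort_phrases : Bool) (out : List (String × List (String × Int))) : Decidable (Spec_aggregate_patterns phrase_dict sort_phrases out) := by unfold Spec_aggregate_patterns; infer_instance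

-- ===== CLAIM (what is proved, stated in full; the proofs are below) =====
def Claim_equal_aggregate_patterns : Prop := ∀ (phrase_dict : List (String × List (List String))) (sort_phrases : Bool), Dom_aggregate_patterns phrase_dict sort_phrases → Spec_aggregate_patterns phrase_dict sort_phrases (aggregate_patterns phrase_dict sort_phrases)

-- ===== LEMMAS AND PROOFS =====

-- every element after the x-run of a sorted list x :: xs is strictly greater than x
lemma pvDrop_gt (x : String) (xs : List String) (h : List.Pairwise (· ≤ ·) (x :: xs)) :
    ∀ y ∈ xs.dropWhile (· == x), x < y := by
  induction xs with
  | nil => simp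
  | cons z zs ih =>
    rcases List.pairwise_cons.1 h with ⟨hx, hz⟩
    by_cases hzx : z = x
    · subst hzx
      rw [List.dropWhile_cons_of_pos (by simp)]
      exact ih (List.pairwise_cons.2 ⟨fun y hy => hx y (by simp [hy]), (List.pairwise_cons.1 hz).2⟩)
    · rw [List.dropWhile_cons_of_neg (by simp [hzx])]
      intro y hy
      rcases List.mem_cons.1 hy with rfl | hy
      · exact lt_of_le_of_ne (hx y (by simp)) (Ne.symm hzx)
      · exact lt_of_lt_of_le (lt_of_le_of_ne (hx z (by simp)) (Ne.symm hzx))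
          ((List.pairwise_cons.1 hz).1 y hy)

lemma pvTake_eq (x : String) (xs : List String) :
    ∀ y ∈ xs.takeWhile (· == x), y = x := by
  intro y hy
  simpa using List.mem_takeWhile_imp hy

-- run-scan characterisation on a sorted list: membership in pvRuns l
lemma pvRuns_mem (l : List String) (h : List.Pairwise (· ≤ ·) l) (p : String × Int) :
    p ∈ pvRuns l ↔ p.1 ∈ l ∧ p.2 = (l.count p.1 : Int) := by
  induction l using pvRuns.induct with
  | case1 => simp [pvRuns]
  | case2 x xs ih =>
    have hd : List.Pairwise (· ≤ ·) (xs.dropWhile (· == x)) :=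
      List.Pairwise.sublist ((List.dropWhile_sublist (· == x)).cons _) h
    have hgt := pvDrop_gt x xs h
    have hxnot : x ∉ xs.dropWhile (· == x) := fun hx => lt_irrefl x (hgt x hx)
    have hsplit : xs.takeWhile (· == x) ++ xs.dropWhile (· == x) = xs :=
      List.takeWhile_append_dropWhile
    have hcountx : List.count x (x :: xs) = (xs.takeWhile (· == x)).length + 1 := by
      rw [List.count_cons_self]
      conv_lhs => rw [← hsplit]
      rw [List.count_append, List.count_eq_zero.2 hxnot,
        List.count_eq_length.2 (fun b hb => (pvTake_eq x xs b hb).symm), Nat.add_zero]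
    have hcounty : ∀ y : String, y ≠ x → List.count y (x :: xs) = List.count y (xs.dropWhile (· == x)) := by
      intro y hy
      rw [List.count_cons, if_neg (by simpa using Ne.symm hy), Nat.add_zero]
      conv_lhs => rw [← hsplit]
      rw [List.count_append,
        List.count_eq_zero.2 (fun hmem => hy (pvTake_eq x xs y hmem)), Nat.zero_add]
    rw [pvRuns]
    constructor
    · intro hp
      rcases List.mem_cons.1 hp with rfl | hp
      · exact ⟨by simp, by simp [hcountx]⟩
      · rcases (ih hd).1 hp with ⟨h1, h2⟩
        have hne : p.1 ≠ x := fun hh => hxnot (hh ▸ h1)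
        refine ⟨List.mem_cons_of_mem _ ((List.dropWhile_sublist (· == x)).mem h1), ?_⟩
        rw [h2, hcounty p.1 hne]
    · rintro ⟨h1, h2⟩
      by_cases hpx : p.1 = x
      · apply List.mem_cons.2; left
        have : p = (x, ((xs.takeWhile (· == x)).length + 1 : Int)) := by
          apply Prod.ext
          · exact hpx
          · rw [h2, hpx, hcountx]; push_cast; ring
        rw [this]
      · apply List.mem_cons.2; right
        apply (ih hd).2
        rcases List.mem_cons.1 h1 with hh | h1
        · exact absurd hh hpx
        · have : p.1 ∈ xs.dropWhile (· == x) := by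
            rw [← hsplit] at h1
            rcases List.mem_append.1 h1 with h1 | h1
            · exact absurd (pvTake_eq x xs _ h1) hpx
            · exact h1
          exact ⟨this, by rw [h2, hcounty p.1 hpx]⟩

-- keys of pvRuns of a sorted list are strictly increasing
lemma pvRuns_keys_lt (l : List String) (h : List.Pairwise (· ≤ ·) l) :
    List.Pairwise (fun a b : String × Int => a.1 < b.1) (pvRuns l) := by
  induction l using pvRuns.induct with
  | case1 => simp [pvRuns]
  | case2 x xs ih =>
    have hd : List.Pairwise (· ≤ ·) (xs.dropWhile (· == x)) :=
      List.Pairwise.sublist ((List.dropWhile_sublist (· == x)).cons _) h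
    rw [pvRuns]
    refine List.pairwise_cons.2 ⟨?_, ih hd⟩
    intro q hq
    exact pvDrop_gt x xs h q.1 ((pvRuns_mem _ hd q).1 hq).1

-- the per-period computations of A and B coincide
lemma pvPerKey (f : List String) :
    PySem.List.sorted (PySem.Dict.counter f).items (fun p => p.1)
      = pvRuns (PySem.List.sorted f (fun s => s)) := by
  set s := PySem.List.sorted f (fun s => s) with hs
  have hsp : List.Pairwise (· ≤ ·) s := PySem.List.sorted_pairwise f (fun s => s)
  have hperm : s.Perm f := PySem.List.sorted_perm f (fun s => s) false
  apply PySem.List.sorted_eq_of_perm_of_pairwise_lt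
  · -- (pvRuns s).Perm (counter f).items
    rw [PySem.Dict.items_counter]
    have hn1 : (pvRuns s).Nodup :=
      (pvRuns_keys_lt s hsp).imp fun hab he => absurd (congrArg Prod.fst he) (ne_of_lt hab)
    have hn2 : (List.map (fun k => (k, (List.count k f : Int))) (PySem.Set.ofList f)).Nodup :=
      List.Nodup.map (fun a b hab => congrArg Prod.fst hab) (PySem.Set.nodup_ofList f)
    apply List.perm_of_nodup_nodup_toFinset_eq hn1 hn2
    ext p
    simp only [List.mem_toFinset, List.mem_map, pvRuns_mem s hsp, PySem.Set.mem_ofList]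
    constructor
    · rintro ⟨h1, h2⟩
      exact ⟨p.1, hperm.mem_iff.1 h1, by rw [← hperm.count_eq p.1, ← h2]⟩
    · rintro ⟨k, hk, rfl⟩
      exact ⟨hperm.mem_iff.2 hk, by rw [hperm.count_eq]⟩
  · exact pvRuns_keys_lt s hsp

-- ===== VERDICT (by name: the statement is the Claim_ definition above) =====
theorem aggregate_patterns_spec : Claim_equal_aggregate_patterns := by
  intro phrase_dict sort_phrases _
  show aggregate_patterns phrase_dict sort_phrases = aggregate_patterns_alt phrase_dict sort_phrases
  have hfe : (fun (agg : PySem.Dict String (List (String × Int))) (kv : String × List (List String)) =>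
        agg.insert kv.1 (PySem.List.sorted (PySem.Dict.counter kv.2.flatten).items (fun p => p.1)))
      = (fun agg kv => agg.insert kv.1 (pvRuns (PySem.List.sorted kv.2.flatten (fun s => s)))) := by
    funext agg kv
    rw [pvPerKey]
  simp only [aggregate_patterns, aggregate_patterns_alt, hfe]
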